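-- pv_equiv track=rewrite | github.com/wvkong67/yt-bulk-subtitles-downloader | ytbsd.py | normalize_channel_url
-- ===== SOURCE A (Python) =====
-- def normalize_channel_url(url: str) -> str:
--     """
--     Normalize channel URL by removing trailing /videos, /shorts, /streams, etc.
--     Returns the base channel URL.
--     """
--     # Remove trailing slashes
--     url = url.rstrip('/')
--
--     # Remove known tab suffixes
--     suffixes = ['/videos', '/shorts', '/streams', '/playlists', '/community', '/channels', '/about', '/featured']
--     for suffix in suffixes:
--         if url.endswith(suffix):
--             url = url[:-len(suffix)]
--             break
--
--     return url
-- ===== SOURCE B (Python) =====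
-- TAB_NAMES = {'videos', 'shorts', 'streams', 'playlists', 'community', 'channels', 'about', 'featured'}
--
-- def normalize_channel_url(url: str) -> str:
--     """
--     Normalize channel URL by removing trailing /videos, /shorts, /streams, etc.
--     Returns the base channel URL.
--     """
--     url = url.rstrip('/')
--     # Split off the last path component once and check it against the tab names.
--     base, sep, last = url.rpartition('/')
--     if sep and last in TAB_NAMES:
--         return base
--     return url
-- ===== Notes on version B (the rewrite author's own statement) =====
-- stated objective: idiomatic
-- what changed: Instead of scanning eight candidate suffixes with endswith and slicing, B splits the stripped URL once at its last '/' (rpartition) and does a single membership test of the last path component against a set of tab names.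
import Mathlib
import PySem

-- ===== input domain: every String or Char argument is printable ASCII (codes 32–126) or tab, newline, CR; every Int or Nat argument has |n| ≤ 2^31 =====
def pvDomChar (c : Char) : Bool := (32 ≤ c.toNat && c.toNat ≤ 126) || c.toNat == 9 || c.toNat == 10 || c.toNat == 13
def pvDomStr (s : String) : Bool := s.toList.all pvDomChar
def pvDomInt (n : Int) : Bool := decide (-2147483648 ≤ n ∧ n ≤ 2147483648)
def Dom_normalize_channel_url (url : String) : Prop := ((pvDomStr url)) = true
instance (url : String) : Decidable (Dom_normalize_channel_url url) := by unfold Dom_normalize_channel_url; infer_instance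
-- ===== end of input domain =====

-- B replaces A's scan over eight endswith candidates by a single split at the last '/'
-- (rpartition) plus one set-membership test of the last path component (idiomatic, one pass).

-- ===== PORT A =====
-- A's literal suffix list
def pvSuffixesA : List (List Char) :=
  ["/videos".toList, "/shorts".toList, "/streams".toList, "/playlists".toList,
   "/community".toList, "/channels".toList, "/about".toList, "/featured".toList]

-- A's for-loop with break: strip the first suffix that matches
def pvLoopA (cs : List Char) : List (List Char) → List Char
  | [] => cs
  | s :: rest =>
    if PySem.Chars.endswith cs s then
      PySem.List.slice cs none (some (-(s.length : Int)))   -- url[:-len(suffix)]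
    else pvLoopA cs rest

def normalize_channel_url (url : String) : String :=
  -- url.rstrip('/'): exact — drops exactly the maximal run of trailing '/' characters
  let cs := url.toList.rdropWhile (· == '/')
  String.mk (pvLoopA cs pvSuffixesA)

-- ===== PORT B =====
-- B's set of bare tab names
def pvTabNames : PySem.Set (List Char) :=
  PySem.Set.ofList
    ["videos".toList, "shorts".toList, "streams".toList, "playlists".toList,
     "community".toList, "channels".toList, "about".toList, "featured".toList]

def normalize_channel_url_alt (url : String) : String :=
  let cs := url.toList.rdropWhile (· == '/')         -- url.rstrip('/'), exact as in A's port
  -- base, sep, last = url.rpartition('/'): exact — split at the LAST '/' via the reversed list;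
  -- rest = [] models sep = '' (no '/' present), otherwise rest = '/' :: reversed base
  let r := cs.reverse
  let last := (r.takeWhile (fun c => c != '/')).reverse
  let rest := r.dropWhile (fun c => c != '/')
  if !rest.isEmpty && pvTabNames.contains last then
    String.mk rest.tail.reverse                      -- return base
  else
    String.mk cs                                     -- return url

-- ===== PRECONDITION & SPEC =====
def Spec_normalize_channel_url (url : String) (out : String) : Prop := out = normalize_channel_url_alt url
instance (url : String) (out : String) : Decidable (Spec_normalize_channel_url url out) := by unfold Spec_normalize_channel_url; infer_instance

-- ===== CLAIM (what is proved, stated in full; the proofs are below) =====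
def Claim_equal_normalize_channel_url : Prop := ∀ (url : String), Dom_normalize_channel_url url → Spec_normalize_channel_url url (normalize_channel_url url)

-- ===== LEMMAS AND PROOFS =====

-- w ++ ['/'] is a prefix of r  ↔  the maximal '/'-free prefix of r is exactly w and a '/' follows
lemma prefix_slash_iff (w : List Char) (hw : '/' ∉ w) :
    ∀ r : List Char,
      (w ++ ['/'] <+: r) ↔
        (r.takeWhile (fun c => c != '/') = w ∧ r.dropWhile (fun c => c != '/') ≠ []) := by
  induction w with
  | nil =>
    intro r
    cases r with
    | nil => simp
    | cons c r' =>
      by_cases hc : c = '/'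
      · simp [hc, List.cons_prefix_cons]
      · simp [hc, List.cons_prefix_cons, Ne.symm hc]
  | cons a w' ih =>
    intro r
    have ha : a ≠ '/' := fun h => hw (h ▸ List.mem_cons_self)
    have hw' : '/' ∉ w' := fun h => hw (List.mem_cons_of_mem a h)
    cases r with
    | nil => simp
    | cons c r' =>
      by_cases hc : c = '/'
      · subst hc
        have hno : ¬ ((a :: w') ++ ['/'] <+: '/' :: r') := by
          rw [List.cons_append, List.cons_prefix_cons]
          rintro ⟨h1, -⟩; exact ha h1
        constructor
        · intro h; exact absurd h hno
        · rintro ⟨h1, -⟩; simp at h1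
      · simp only [List.cons_append, List.cons_prefix_cons, List.takeWhile_cons,
            List.dropWhile_cons]
        have hpc : (c != '/') = true := by simpa using hc
        simp only [hpc, if_true, List.cons.injEq]
        rw [ih hw' r']
        constructor
        · rintro ⟨h1, h2, h3⟩; exact ⟨⟨h1.symm, h2⟩, h3⟩
        · rintro ⟨⟨h1, h2⟩, h3⟩; exact ⟨h1.symm, h2, h3⟩

-- endswith against a '/'-headed suffix, phrased on the reversed stripped list
lemma endswith_char (cs w : List Char) (hw : '/' ∉ w) :
    PySem.Chars.endswith cs ('/' :: w) = true ↔
      (cs.reverse.takeWhile (fun c => c != '/') = w.reverse ∧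
       cs.reverse.dropWhile (fun c => c != '/') ≠ []) := by
  rw [PySem.Chars.endswith_iff]
  have h1 : ('/' :: w) <:+ cs ↔ (('/' :: w).reverse <+: cs.reverse) := by
    constructor
    · intro h; exact List.reverse_prefix.mpr h
    · intro h; exact List.reverse_prefix.mp h
  rw [h1]
  have h2 : ('/' :: w).reverse = w.reverse ++ ['/'] := by simp
  rw [h2]
  exact prefix_slash_iff w.reverse (by simpa using hw) cs.reverse

-- in the match case, A's slice url[:-len('/'+word)] is exactly the base part
lemma slice_match (cs w : List Char)
    (ht : cs.reverse.takeWhile (fun c => c != '/') = w.reverse)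
    (hd : cs.reverse.dropWhile (fun c => c != '/') ≠ []) :
    PySem.List.slice cs none (some (-(('/' :: w).length : Int))) =
      (cs.reverse.dropWhile (fun c => c != '/')).tail.reverse := by
  obtain ⟨c, d', hdc⟩ : ∃ c d', cs.reverse.dropWhile (fun c => c != '/') = c :: d' := by
    cases hh : cs.reverse.dropWhile (fun c => c != '/') with
    | nil => exact absurd hh hd
    | cons c d' => exact ⟨c, d', rfl⟩
  have hc : c = '/' := by
    have h := List.head_dropWhile_not (fun c => c != '/') (l := cs.reverse) (by simp [hdc])
    simp only [hdc] at h
    simpa using h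
  have hcs : cs = d'.reverse ++ (['/'] ++ w) := by
    have h0 : cs.reverse = cs.reverse.takeWhile (fun c => c != '/') ++
        cs.reverse.dropWhile (fun c => c != '/') := (List.takeWhile_append_dropWhile).symm
    have : cs = (cs.reverse.takeWhile (fun c => c != '/') ++
        cs.reverse.dropWhile (fun c => c != '/')).reverse := by
      rw [← h0]; simp
    rw [this, hdc, hc, ht]; simp
  have hk : 0 < ('/' :: w).length := by simp
  rw [PySem.List.slice_to_neg_natCast cs _ hk, hdc, hcs]
  have hlen : (d'.reverse ++ (['/'] ++ w)).length - ('/' :: w).length = d'.reverse.length := by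
    simp
  rw [hlen]
  simp

-- the bare words of A's suffixes: pvSuffixesA is exactly pvWords with '/' prepended
def pvWords : List (List Char) :=
  ["videos".toList, "shorts".toList, "streams".toList, "playlists".toList,
   "community".toList, "channels".toList, "about".toList, "featured".toList]

lemma suffixesA_eq : pvSuffixesA = pvWords.map (fun w => '/' :: w) := by decide

-- A's loop over any '/'-free word list computes the rpartition-and-member form
lemma loopA_char (cs : List Char) :
    ∀ ws : List (List Char), (∀ w ∈ ws, '/' ∉ w) →
      pvLoopA cs (ws.map (fun w => '/' :: w)) =
        (if (cs.reverse.dropWhile (fun c => c != '/') ≠ [] ∧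
             (cs.reverse.takeWhile (fun c => c != '/')).reverse ∈ ws)
         then (cs.reverse.dropWhile (fun c => c != '/')).tail.reverse
         else cs) := by
  intro ws
  induction ws with
  | nil => intro _; simp [pvLoopA]
  | cons w rest ih =>
    intro hws
    have hw : '/' ∉ w := hws w (by simp)
    have hrest : ∀ v ∈ rest, '/' ∉ v := fun v hv => hws v (by simp [hv])
    simp only [List.map_cons, pvLoopA]
    by_cases hmatch : PySem.Chars.endswith cs ('/' :: w) = true
    · obtain ⟨ht, hd⟩ := (endswith_char cs w hw).mp hmatch
      rw [if_pos hmatch, slice_match cs w ht hd, if_pos]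
      refine ⟨hd, ?_⟩
      rw [ht]; simp
    · rw [if_neg hmatch, ih hrest]
      have hne := fun h => hmatch ((endswith_char cs w hw).mpr h)
      by_cases hd : cs.reverse.dropWhile (fun c => c != '/') = []
      · simp [hd]
      · have htne : (cs.reverse.takeWhile (fun c => c != '/')).reverse ≠ w := by
          intro h
          exact hne ⟨by rw [← h]; simp, hd⟩
        simp [hd, htne]

-- membership in B's tab-name set is membership in pvWords
lemma tabNames_mem (x : List Char) : x ∈ pvTabNames ↔ x ∈ pvWords := by
  simp [pvTabNames, pvWords, PySem.Set.mem_ofList]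

-- ===== VERDICT (by name: the statement is the Claim_ definition above) =====
theorem normalize_channel_url_spec : Claim_equal_normalize_channel_url := by
  intro url _
  unfold Spec_normalize_channel_url normalize_channel_url normalize_channel_url_alt
  dsimp only
  rw [suffixesA_eq, loopA_char _ pvWords (by decide)]
  by_cases hd : (url.toList.rdropWhile (· == '/')).reverse.dropWhile (fun c => c != '/') = [] <;>
    by_cases hm : ((url.toList.rdropWhile (· == '/')).reverse.takeWhile (fun c => c != '/')).reverse ∈ pvWords <;>
      simp [hd, hm, tabNames_mem]
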